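-- pv_equiv track=rewrite | github.com/donado10/baeaubab_module | Queue/worker_2/main.py | get_master_bill
-- ===== SOURCE A (Python) =====
-- def get_master_bill(factures):
--     master_bill_by_dg = [x for x in factures if x[3] == 1]
--
--     if len(master_bill_by_dg):
--         return master_bill_by_dg[0]
--
--     master_bill_by_dg = factures[0]
--     for fact in factures:
--         if fact[1] > master_bill_by_dg[1]:
--             master_bill_by_dg = fact
--
--     return master_bill_by_dg
-- ===== SOURCE B (Python) =====
-- def get_master_bill(factures):
--     # One reduction: DG factures get lexicographic priority (0, 0); all others
--     # compete by (1, -amount).  min() keeps the FIRST minimal element, which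
--     # reproduces both "first DG facture" and the strict-> earliest-max tie-break.
--     return min(factures, key=lambda f: (0, 0) if f[3] == 1 else (1, -f[1]))
-- ===== Notes on version B (the rewrite author's own statement) =====
-- stated objective: alternative
-- what changed: Replaces A's two-stage logic (filter comprehension for DG rows, then a separate running-max loop fallback) by one reduction: min() over a composite lexicographic key (0,0) for DG rows and (1,-amount) otherwise, whose first-minimal tie-break yields exactly the first DG facture or the first maximum-amount facture.
import Mathlib
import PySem

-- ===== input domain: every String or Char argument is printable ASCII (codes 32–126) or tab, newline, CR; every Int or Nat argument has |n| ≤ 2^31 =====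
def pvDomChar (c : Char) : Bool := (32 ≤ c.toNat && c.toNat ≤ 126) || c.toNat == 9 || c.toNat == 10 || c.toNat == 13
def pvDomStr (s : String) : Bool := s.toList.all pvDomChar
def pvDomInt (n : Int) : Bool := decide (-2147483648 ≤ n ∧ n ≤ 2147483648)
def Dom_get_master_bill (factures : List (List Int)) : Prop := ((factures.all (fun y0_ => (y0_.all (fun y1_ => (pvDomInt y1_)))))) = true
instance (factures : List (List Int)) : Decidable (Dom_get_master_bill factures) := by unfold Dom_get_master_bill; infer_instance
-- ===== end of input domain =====

-- B replaces A's two stages (DG filter comprehension, then a separate running-max loop)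
-- by one min() reduction with a lexicographic priority key; return value only.

-- ===== PORT A =====
def get_master_bill (factures : List (List Int)) : List Int :=
  let master_bill_by_dg := factures.filter (fun x => PySem.List.pyGetD x 3 0 == 1)
  if master_bill_by_dg.length ≠ 0 then
    PySem.List.pyGetD master_bill_by_dg 0 []
  else
    factures.foldl
      (fun best fact =>
        if PySem.List.pyGetD fact 1 0 > PySem.List.pyGetD best 1 0 then fact else best)
      (PySem.List.pyGetD factures 0 [])

-- ===== PORT B =====
-- the two components of Source B's key: (0, 0) if f[3] == 1 else (1, -f[1])
def gmbKey1 (f : List Int) : Int := if PySem.List.pyGetD f 3 0 == 1 then 0 else 1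
def gmbKey2 (f : List Int) : Int := if PySem.List.pyGetD f 3 0 == 1 then 0 else -(PySem.List.pyGetD f 1 0)

def get_master_bill_alt (factures : List (List Int)) : List Int :=
  (PySem.List.min2? factures gmbKey1 gmbKey2).getD []

-- ===== PRECONDITION & SPEC =====
-- Python A raises IndexError on the empty list (factures[0]) and on any row shorter
-- than 4 (x[3]); Pre_ excludes exactly those inputs.
def Pre_get_master_bill (factures : List (List Int)) : Prop :=
  factures ≠ [] ∧ ∀ row ∈ factures, 4 ≤ row.length
instance (factures : List (List Int)) : Decidable (Pre_get_master_bill factures) := by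
  unfold Pre_get_master_bill; infer_instance

def pvWitness_get_master_bill : List (List Int) := [[7, 20, 30, 0], [8, 50, 60, 1]]

def Spec_get_master_bill (factures : List (List Int)) (out : List Int) : Prop := out = get_master_bill_alt factures
instance (factures : List (List Int)) (out : List Int) : Decidable (Spec_get_master_bill factures out) := by unfold Spec_get_master_bill; infer_instance

-- ===== CLAIM (what is proved, stated in full; the proofs are below) =====
def Claim_equal_get_master_bill : Prop := ∀ (factures : List (List Int)), Dom_get_master_bill factures → Pre_get_master_bill factures → Spec_get_master_bill factures (get_master_bill factures)

-- ===== LEMMAS AND PROOFS =====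

-- abbreviations for the two loop bodies (proof-local)
def gmbStep (acc : Option (List Int)) (x : List Int) : Option (List Int) :=
  match acc with
  | none => some x
  | some m =>
    if (decide (gmbKey1 x < gmbKey1 m) ||
        !decide (gmbKey1 m < gmbKey1 x) && decide (gmbKey2 x < gmbKey2 m)) = true
    then some x else some m

def gmbMax (best fact : List Int) : List Int :=
  if PySem.List.pyGetD fact 1 0 > PySem.List.pyGetD best 1 0 then fact else best

theorem min2?_eq_foldl_gmbStep (xs : List (List Int)) :
    PySem.List.min2? xs gmbKey1 gmbKey2 = xs.foldl gmbStep none := by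
  unfold PySem.List.min2?
  apply List.foldl_ext
  intro acc x _
  cases acc <;> rfl

-- once the accumulator is a DG facture, the reduction never replaces it
theorem gmbStep_dg_stable (xs : List (List Int)) (m : List Int)
    (hm : PySem.List.pyGetD m 3 0 == 1) : xs.foldl gmbStep (some m) = some m := by
  induction xs with
  | nil => rfl
  | cons x t ih =>
    rw [List.foldl_cons]
    have hstep : gmbStep (some m) x = some m := by
      by_cases hx : PySem.List.pyGetD x 3 0 == 1 <;>
        simp [gmbStep, gmbKey1, gmbKey2, hx, hm]
    rw [hstep]; exact ih

-- with a non-DG accumulator the reduction finds the first DG facture, or else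
-- performs exactly A's running-max loop
theorem gmbStep_main (xs : List (List Int)) (m : List Int)
    (hm : ¬ (PySem.List.pyGetD m 3 0 == 1)) :
    xs.foldl gmbStep (some m) =
      match xs.filter (fun x => PySem.List.pyGetD x 3 0 == 1) with
      | d :: _ => some d
      | [] => some (xs.foldl gmbMax m) := by
  induction xs generalizing m with
  | nil => rfl
  | cons x t ih =>
    rw [List.foldl_cons]
    by_cases hx : PySem.List.pyGetD x 3 0 == 1
    · have hstep : gmbStep (some m) x = some x := by
        simp [gmbStep, gmbKey1, hx, hm]
      rw [hstep, gmbStep_dg_stable t x hx]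
      simp [hx]
    · have hstep : gmbStep (some m) x = some (gmbMax m x) := by
        simp only [gmbStep, gmbKey1, gmbKey2, hx, hm, gmbMax]
        by_cases h : PySem.List.pyGetD x 1 0 > PySem.List.pyGetD m 1 0 <;>
          simp [h]
      have hmx : ¬ (PySem.List.pyGetD (gmbMax m x) 3 0 == 1) := by
        unfold gmbMax; split <;> assumption
      rw [hstep, ih (gmbMax m x) hmx]
      simp [hx, List.foldl_cons]

-- ===== VERDICT (by name: the statement is the Claim_ definition above) =====
theorem get_master_bill_spec : Claim_equal_get_master_bill := by
  intro factures _ hpre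
  obtain ⟨hne, -⟩ := hpre
  unfold Spec_get_master_bill get_master_bill get_master_bill_alt
  rw [min2?_eq_foldl_gmbStep]
  have hA : ∀ (l : List (List Int)) (init : List Int),
      l.foldl (fun best fact =>
        if PySem.List.pyGetD fact 1 0 > PySem.List.pyGetD best 1 0 then fact else best) init
      = l.foldl gmbMax init := by
    intro l init
    apply List.foldl_ext
    intro a y _
    rfl
  cases factures with
  | nil => exact absurd rfl hne
  | cons x t =>
    have hB : List.foldl gmbStep none (x :: t) = List.foldl gmbStep (some x) t := rfl
    rw [hB]
    by_cases hx : PySem.List.pyGetD x 3 0 == 1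
    · rw [gmbStep_dg_stable t x hx]
      simp [hx, PySem.List.pyGetD_zero_cons]
    · rw [gmbStep_main t x hx]
      cases hf : t.filter (fun y => PySem.List.pyGetD y 3 0 == 1) with
      | cons d r =>
        have hfc : (x :: t).filter (fun y => PySem.List.pyGetD y 3 0 == 1) = d :: r := by
          simp [hx, hf]
        simp [hfc, PySem.List.pyGetD_zero_cons]
      | nil =>
        have hfc : (x :: t).filter (fun y => PySem.List.pyGetD y 3 0 == 1) = [] := by
          simp [hx, hf]
        simp only [hfc, List.length_nil, ne_eq, not_true_eq_false, if_false,
          PySem.List.pyGetD_zero_cons, List.foldl_cons, hA]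
        have hxx : gmbMax x x = x := by simp [gmbMax]
        rw [hxx]
        rfl
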